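-- pv_equiv track=rewrite | github.com/o9-9/discord-tool-copy-cord | code/client/forwarding.py | _split_caption_and_rest
-- ===== SOURCE A (Python) =====
-- def _split_caption_and_rest(lines: list[str], limit: int) -> tuple[str, list[str]]:
--     caption_lines: list[str] = []
--     remaining: list[str] = []
--     used = 0
--     finished_caption = False
--
--     for line in lines:
--         if finished_caption:
--             remaining.append(line)
--             continue
--
--         extra = (1 if caption_lines else 0) + len(line)
--         if used + extra <= limit:
--             caption_lines.append(line)
--             used += extra
--         else:
--             if not caption_lines:
--                 truncated = line[:limit]
--                 caption_lines.append(truncated)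
--             else:
--                 remaining.append(line)
--             finished_caption = True
--
--     caption = "\n".join(caption_lines) if caption_lines else ""
--     return caption, remaining
-- ===== SOURCE B (Python) =====
-- def _split_caption_and_rest(lines: list[str], limit: int) -> tuple[str, list[str]]:
--     # Stage 1: prefix sums — costs[k] = len("\n".join(lines[:k])).
--     costs = [0]
--     total = 0
--     first = True
--     for line in lines:
--         total += (0 if first else 1) + len(line)
--         first = False
--         costs.append(total)
--     # Stage 2: binary search the largest k with costs[k] <= limit
--     # (costs is nondecreasing; k stays 0 when even costs -- which start at 0 -- exceed a negative limit).
--     lo, hi = 0, len(lines)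
--     while lo < hi:
--         mid = (lo + hi + 1) // 2
--         if costs[mid] <= limit:
--             lo = mid
--         else:
--             hi = mid - 1
--     k = lo
--     # Stage 3: slice out the answer.
--     if k == len(lines):
--         return "\n".join(lines), []
--     if k == 0:
--         return lines[0][:limit], lines[1:]
--     return "\n".join(lines[:k]), lines[k:]
-- ===== Notes on version B (the rewrite author's own statement) =====
-- stated objective: alternative
-- what changed: Replaces A's single greedy accumulation loop (flag + line-by-line caption/remainder building) with three staged passes: a prefix-sum pass over line lengths, a binary search over the monotone cost array for the largest fitting prefix, and slice/join of that prefix.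
import Mathlib
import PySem

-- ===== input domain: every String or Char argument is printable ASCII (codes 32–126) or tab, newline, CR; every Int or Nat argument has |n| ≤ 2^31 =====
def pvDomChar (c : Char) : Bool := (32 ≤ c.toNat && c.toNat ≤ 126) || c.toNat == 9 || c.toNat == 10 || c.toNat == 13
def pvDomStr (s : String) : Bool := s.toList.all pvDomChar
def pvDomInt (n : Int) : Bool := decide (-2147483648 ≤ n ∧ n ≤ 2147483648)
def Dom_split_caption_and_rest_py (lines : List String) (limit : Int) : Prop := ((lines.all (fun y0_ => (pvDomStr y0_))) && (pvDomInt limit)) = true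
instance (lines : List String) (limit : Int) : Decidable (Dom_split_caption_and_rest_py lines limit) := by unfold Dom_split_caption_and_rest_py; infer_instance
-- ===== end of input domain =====

-- B replaces A's greedy flag-loop with prefix sums + binary search over the monotone cost array + slicing (alternative decomposition, same cost).

-- ===== PORT A =====
-- state: (caption_lines, remaining, used, finished_caption)
def pvStepA (limit : Int) (st : List String × List String × Int × Bool) (line : String) : List String × List String × Int × Bool :=
  match st with
  | (cap, rem, used, finished) =>
    if finished then (cap, rem ++ [line], used, finished)
    else
      let extra := (if cap ≠ [] then 1 else 0) + PySem.Str.len line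
      if used + extra ≤ limit then (cap ++ [line], rem, used + extra, false)
      else if cap = [] then (cap ++ [PySem.Str.slice line none (some limit)], rem, used, true)
      else (cap, rem ++ [line], used, true)

def split_caption_and_rest_py (lines : List String) (limit : Int) : String × List String :=
  let st := lines.foldl (pvStepA limit) ([], [], 0, false)
  ((if st.1 ≠ [] then PySem.Str.join "\n" st.1 else ""), st.2.1)

-- ===== PORT B =====
-- Stage 1: the costs loop (without the leading 0); `first` is Source B's first flag
def pvCostsGo (total : Int) (first : Bool) : List String → List Int
  | [] => []
  | line :: rest =>
    let total' := total + ((if first then 0 else 1) + PySem.Str.len line)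
    total' :: pvCostsGo total' false rest

-- costs = [0] then the appended running totals
def pvCosts (lines : List String) : List Int := 0 :: pvCostsGo 0 true lines

-- Stage 2: the while-loop binary search; costs[mid] is always in range, ported as getD.
-- The loop is ported with a fuel parameter (hi - lo shrinks each turn, so fuel = hi suffices).
def pvBS (costs : List Int) (limit : Int) : Nat → Nat → Nat → Nat
  | 0, lo, _ => lo
  | fuel + 1, lo, hi =>
    if lo < hi then
      let mid := (lo + hi + 1) / 2
      if costs.getD mid 0 ≤ limit then pvBS costs limit fuel mid hi
      else pvBS costs limit fuel lo (mid - 1)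
    else lo

-- Stage 3: slice out the answer (lines[k:] with 0 ≤ k is List.drop k; lines[0] is in range since k < len)
def split_caption_and_rest_py_alt (lines : List String) (limit : Int) : String × List String :=
  let costs := pvCosts lines
  let k := pvBS costs limit lines.length 0 lines.length
  if k = lines.length then (PySem.Str.join "\n" lines, [])
  else if k = 0 then (PySem.Str.slice (lines.getD 0 "") none (some limit), lines.drop 1)
  else (PySem.Str.join "\n" (lines.take k), lines.drop k)

-- ===== PRECONDITION & SPEC =====
def Spec_split_caption_and_rest_py (lines : List String) (limit : Int) (out : String × List String) : Prop := out = split_caption_and_rest_py_alt lines limit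
instance (lines : List String) (limit : Int) (out : String × List String) : Decidable (Spec_split_caption_and_rest_py lines limit out) := by unfold Spec_split_caption_and_rest_py; infer_instance

-- ===== CLAIM (what is proved, stated in full; the proofs are below) =====
def Claim_equal_split_caption_and_rest_py : Prop := ∀ (lines : List String) (limit : Int), Dom_split_caption_and_rest_py lines limit → Spec_split_caption_and_rest_py lines limit (split_caption_and_rest_py lines limit)

-- ===== LEMMAS AND PROOFS =====

-- greedy boundary index (proof-side characterisation of A's loop)
def pvKG (limit used : Int) (first : Bool) : List String → Nat
  | [] => 0
  | l :: ls =>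
    let e := (if first then 0 else 1) + PySem.Str.len l
    if used + e ≤ limit then pvKG limit (used + e) false ls + 1 else 0

-- canonical output as a function of the boundary index
def pvCanon (lines : List String) (limit : Int) (k : Nat) : String × List String :=
  if lines = [] then ("", [])
  else if k = 0 then (PySem.Str.slice (lines.getD 0 "") none (some limit), lines.drop 1)
  else (PySem.Str.join "\n" (lines.take k), lines.drop k)

theorem pvKG_cons (limit used : Int) (first : Bool) (l : String) (ls : List String) :
    pvKG limit used first (l :: ls)
      = if used + ((if first then 0 else 1) + PySem.Str.len l) ≤ limit
        then pvKG limit (used + ((if first then 0 else 1) + PySem.Str.len l)) false ls + 1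
        else 0 := rfl

theorem pvCostsGo_cons (total : Int) (first : Bool) (l : String) (ls : List String) :
    pvCostsGo total first (l :: ls)
      = (total + ((if first then 0 else 1) + PySem.Str.len l))
          :: pvCostsGo (total + ((if first then 0 else 1) + PySem.Str.len l)) false ls := rfl

theorem pvStepA_fit (limit used : Int) (cap rem : List String) (l : String)
    (hcap : cap ≠ []) (h : used + (1 + PySem.Str.len l) ≤ limit) :
    pvStepA limit (cap, rem, used, false) l = (cap ++ [l], rem, used + (1 + PySem.Str.len l), false) := by
  simp [pvStepA, hcap]
  simpa using h

theorem pvStepA_nofit (limit used : Int) (cap rem : List String) (l : String)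
    (hcap : cap ≠ []) (h : ¬ used + (1 + PySem.Str.len l) ≤ limit) :
    pvStepA limit (cap, rem, used, false) l = (cap, rem ++ [l], used, true) := by
  simp [pvStepA, hcap]
  simpa using h

-- once finished, A's loop only appends the rest to remaining
theorem pvStepA_finished (limit : Int) (rest : List String) :
    ∀ (cap rem : List String) (used : Int),
      rest.foldl (pvStepA limit) (cap, rem, used, true) = (cap, rem ++ rest, used, true) := by
  induction rest with
  | nil => intro cap rem used; simp
  | cons line rest ih =>
    intro cap rem used
    simp only [List.foldl_cons, pvStepA, if_pos]
    rw [ih]; simp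

-- A's loop from an unfinished nonempty caption: caption/remaining are take/drop at the greedy index
theorem pvFoldA_char (limit : Int) (ls : List String) :
    ∀ (cap rem : List String) (used : Int), cap ≠ [] →
      (ls.foldl (pvStepA limit) (cap, rem, used, false)).1 = cap ++ ls.take (pvKG limit used false ls) ∧
      (ls.foldl (pvStepA limit) (cap, rem, used, false)).2.1 = rem ++ ls.drop (pvKG limit used false ls) := by
  induction ls with
  | nil => intro cap rem used _; simp [pvKG]
  | cons l ls ih =>
    intro cap rem used hcap
    rw [pvKG_cons]
    simp only [Bool.false_eq_true, if_false, List.foldl_cons]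
    by_cases hfit : used + (1 + PySem.Str.len l) ≤ limit
    · rw [pvStepA_fit limit used cap rem l hcap hfit, if_pos hfit]
      obtain ⟨h1, h2⟩ := ih (cap ++ [l]) rem (used + (1 + PySem.Str.len l)) (by simp)
      rw [h1, h2]
      simp
    · rw [pvStepA_nofit limit used cap rem l hcap hfit, if_neg hfit, pvStepA_finished]
      simp

theorem pvJoin_singleton (s : String) : PySem.Str.join "\n" [s] = s := by
  simp [PySem.Str.join, PySem.Chars.join, List.intercalate]

theorem pvJoin_nil : PySem.Str.join "\n" [] = "" := by
  simp [PySem.Str.join, PySem.Chars.join, List.intercalate]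

-- A's output is the canonical form at the greedy index
theorem pvA_eq_canon (lines : List String) (limit : Int) :
    split_caption_and_rest_py lines limit = pvCanon lines limit (pvKG limit 0 true lines) := by
  cases lines with
  | nil => simp [split_caption_and_rest_py, pvCanon]
  | cons l ls =>
    by_cases hfit : ((l.length : Int)) ≤ limit
    · have hkg : pvKG limit 0 true (l :: ls) = pvKG limit ((l.length : Int)) false ls + 1 := by
        simp [pvKG, hfit]
      have hstep : pvStepA limit ([], [], 0, false) l = ([l], [], ((l.length : Int)), false) := by
        simp [pvStepA, hfit]
      obtain ⟨h1, h2⟩ := pvFoldA_char limit ls [l] [] ((l.length : Int)) (by simp)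
      simp only [split_caption_and_rest_py, List.foldl_cons, hstep, hkg]
      rw [h1, h2]
      simp [pvCanon]
    · have hkg : pvKG limit 0 true (l :: ls) = 0 := by
        simp [pvKG, hfit]
      have hstep : pvStepA limit ([], [], 0, false) l
          = ([PySem.Str.slice l none (some limit)], [], 0, true) := by
        simp [pvStepA, hfit]
      simp only [split_caption_and_rest_py, List.foldl_cons, hstep, hkg]
      rw [pvStepA_finished]
      simp [pvCanon, pvJoin_singleton]

-- costs-list facts ------------------------------------------------------------

theorem pvStrLen_nonneg (s : String) : (0 : Int) ≤ PySem.Str.len s := by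
  simp [PySem.Str.len_eq]

-- every entry is ≥ the starting total
theorem pvCostsGo_ge (total : Int) (first : Bool) (ls : List String) :
    ∀ j, j < ls.length → total ≤ (pvCostsGo total first ls).getD j 0 := by
  induction ls generalizing total first with
  | nil => intro j hj; simp at hj
  | cons l ls ih =>
    intro j hj
    have hle : total ≤ total + ((if first then 0 else 1) + PySem.Str.len l) := by
      have := pvStrLen_nonneg l; split_ifs <;> omega
    rw [pvCostsGo_cons]
    cases j with
    | zero => rw [List.getD_cons_zero]; exact hle
    | succ j =>
      have := ih (total + ((if first then 0 else 1) + PySem.Str.len l)) false j (by simpa using hj)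
      rw [List.getD_cons_succ]
      omega

-- the entries are nondecreasing
theorem pvCostsGo_mono (total : Int) (first : Bool) (ls : List String) :
    ∀ i j, i ≤ j → j < ls.length →
      (pvCostsGo total first ls).getD i 0 ≤ (pvCostsGo total first ls).getD j 0 := by
  induction ls generalizing total first with
  | nil => intro i j _ hj; simp at hj
  | cons l ls ih =>
    intro i j hij hj
    rw [pvCostsGo_cons]
    cases i with
    | zero =>
      cases j with
      | zero => exact le_refl _
      | succ j =>
        have := pvCostsGo_ge (total + ((if first then 0 else 1) + PySem.Str.len l)) false ls j (by simpa using hj)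
        rw [List.getD_cons_zero, List.getD_cons_succ]
        omega
    | succ i =>
      cases j with
      | zero => omega
      | succ j =>
        have := ih (total + ((if first then 0 else 1) + PySem.Str.len l)) false i j (by omega) (by simpa using hj)
        rw [List.getD_cons_succ, List.getD_cons_succ]
        exact this

-- monotonicity of the full costs array (indices ≤ n)
theorem pvCosts_mono (lines : List String) :
    ∀ i j, i ≤ j → j ≤ lines.length →
      (pvCosts lines).getD i 0 ≤ (pvCosts lines).getD j 0 := by
  intro i j hij hj
  unfold pvCosts
  cases i with
  | zero =>
    cases j with
    | zero => exact le_refl _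
    | succ j =>
      have := pvCostsGo_ge 0 true lines j (by omega)
      rw [List.getD_cons_zero, List.getD_cons_succ]
      omega
  | succ i =>
    cases j with
    | zero => omega
    | succ j =>
      have := pvCostsGo_mono 0 true lines i j (by omega) (by omega)
      rw [List.getD_cons_succ, List.getD_cons_succ]
      exact this

-- the boundary property: a valid boundary index
def pvP (lines : List String) (limit : Int) (k : Nat) : Prop :=
  k ≤ lines.length ∧ ((pvCosts lines).getD k 0 ≤ limit ∨ k = 0) ∧
  (k = lines.length ∨ limit < (pvCosts lines).getD (k + 1) 0)

-- at most one boundary index (by monotonicity)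
theorem pvP_unique (lines : List String) (limit : Int) (k1 k2 : Nat)
    (h1 : pvP lines limit k1) (h2 : pvP lines limit k2) : k1 = k2 := by
  obtain ⟨hle1, hc1, hn1⟩ := h1
  obtain ⟨hle2, hc2, hn2⟩ := h2
  by_contra hne
  rcases Nat.lt_or_ge k1 k2 with hlt | hge
  · have hk2 : (pvCosts lines).getD k2 0 ≤ limit := by
      rcases hc2 with h | h
      · exact h
      · omega
    have hgt : limit < (pvCosts lines).getD (k1 + 1) 0 := by
      rcases hn1 with h | h
      · omega
      · exact h
    have := pvCosts_mono lines (k1 + 1) k2 (by omega) (by omega)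
    omega
  · have hlt : k2 < k1 := by omega
    have hk1 : (pvCosts lines).getD k1 0 ≤ limit := by
      rcases hc1 with h | h
      · exact h
      · omega
    have hgt : limit < (pvCosts lines).getD (k2 + 1) 0 := by
      rcases hn2 with h | h
      · omega
      · exact h
    have := pvCosts_mono lines (k2 + 1) k1 (by omega) (by omega)
    omega

-- binary-search correctness: the result is a boundary index
theorem pvBS_spec (lines : List String) (limit : Int) :
    ∀ fuel lo hi, hi - lo ≤ fuel → lo ≤ hi → hi ≤ lines.length →
      ((pvCosts lines).getD lo 0 ≤ limit ∨ lo = 0) →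
      (hi = lines.length ∨ limit < (pvCosts lines).getD (hi + 1) 0) →
      pvP lines limit (pvBS (pvCosts lines) limit fuel lo hi) := by
  intro fuel
  induction fuel with
  | zero =>
    intro lo hi hd hlh hhn hlo hhi
    have : lo = hi := by omega
    subst this
    have hred : pvBS (pvCosts lines) limit 0 lo lo = lo := rfl
    rw [hred]
    exact ⟨by omega, hlo, hhi⟩
  | succ fuel ih =>
    intro lo hi hd hlh hhn hlo hhi
    rw [pvBS]
    by_cases h : lo < hi
    · rw [if_pos h]
      by_cases hc : (pvCosts lines).getD ((lo + hi + 1) / 2) 0 ≤ limit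
      · rw [if_pos hc]
        exact ih ((lo + hi + 1) / 2) hi (by omega) (by omega) hhn (Or.inl hc) hhi
      · rw [if_neg hc]
        refine ih lo ((lo + hi + 1) / 2 - 1) (by omega) (by omega) (by omega) hlo ?_
        right
        have heq : (lo + hi + 1) / 2 - 1 + 1 = (lo + hi + 1) / 2 := by omega
        rw [heq]
        omega
    · rw [if_neg h]
      have : lo = hi := by omega
      subst this
      exact ⟨by omega, hlo, hhi⟩

-- the greedy index is within range
theorem pvKG_le (limit : Int) (ls : List String) :
    ∀ used first, pvKG limit used first ls ≤ ls.length := by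
  induction ls with
  | nil => intro used first; simp [pvKG]
  | cons l ls ih =>
    intro used first
    rw [pvKG_cons]
    by_cases h : used + ((if first then 0 else 1) + PySem.Str.len l) ≤ limit
    · rw [if_pos h]
      have := ih (used + ((if first then 0 else 1) + PySem.Str.len l)) false
      simp only [List.length_cons]; omega
    · rw [if_neg h]; simp

-- the greedy index fits and the next line (if any) overflows
theorem pvKG_spec_go (limit : Int) (ls : List String) :
    ∀ used first,
      (pvKG limit used first ls ≠ 0 →
        (pvCostsGo used first ls).getD (pvKG limit used first ls - 1) 0 ≤ limit) ∧
      (pvKG limit used first ls ≠ ls.length →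
        limit < (pvCostsGo used first ls).getD (pvKG limit used first ls) 0) := by
  induction ls with
  | nil => intro used first; simp [pvKG]
  | cons l ls ih =>
    intro used first
    rw [pvKG_cons, pvCostsGo_cons]
    by_cases h : used + ((if first then 0 else 1) + PySem.Str.len l) ≤ limit
    · rw [if_pos h]
      obtain ⟨ih1, ih2⟩ := ih (used + ((if first then 0 else 1) + PySem.Str.len l)) false
      constructor
      · intro _
        cases hk : pvKG limit (used + ((if first then 0 else 1) + PySem.Str.len l)) false ls with
        | zero => simpa [hk] using h
        | succ m =>
          have := ih1 (by omega)
          rw [hk] at this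
          have heq : m + 1 + 1 - 1 = m + 1 := by omega
          rw [heq, List.getD_cons_succ]
          simpa using this
      · intro hne
        have hne' : pvKG limit (used + ((if first then 0 else 1) + PySem.Str.len l)) false ls ≠ ls.length := by
          simpa using hne
        have := ih2 hne'
        rw [List.getD_cons_succ]
        exact this
    · rw [if_neg h]
      refine ⟨by simp, fun _ => ?_⟩
      rw [List.getD_cons_zero]
      omega

-- the greedy index is a boundary index
theorem pvKG_P (lines : List String) (limit : Int) :
    pvP lines limit (pvKG limit 0 true lines) := by
  obtain ⟨h1, h2⟩ := pvKG_spec_go limit lines 0 true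
  refine ⟨pvKG_le limit lines 0 true, ?_, ?_⟩
  · cases hk : pvKG limit 0 true lines with
    | zero => right; rfl
    | succ m =>
      left
      have := h1 (by omega)
      rw [hk] at this
      unfold pvCosts
      rw [List.getD_cons_succ]
      simpa using this
  · by_cases hn : pvKG limit 0 true lines = lines.length
    · left; exact hn
    · right
      have := h2 hn
      unfold pvCosts
      rw [List.getD_cons_succ]
      exact this

-- B's output is the canonical form at the binary-search index
theorem pvB_eq_canon (lines : List String) (limit : Int) :
    split_caption_and_rest_py_alt lines limit
      = pvCanon lines limit (pvBS (pvCosts lines) limit lines.length 0 lines.length) := by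
  unfold split_caption_and_rest_py_alt pvCanon
  set k := pvBS (pvCosts lines) limit lines.length 0 lines.length with hk
  by_cases hnil : lines = []
  · subst hnil
    have h0 : pvBS (pvCosts ([] : List String)) limit 0 0 0 = 0 := rfl
    simp [h0, pvJoin_nil]
  · rw [if_neg hnil]
    by_cases hkn : k = lines.length
    · have hk0 : k ≠ 0 := by
        intro h0; rw [h0] at hkn; exact hnil (List.length_eq_zero_iff.mp hkn.symm)
      rw [if_pos hkn, if_neg hk0, hkn]
      simp
    · rw [if_neg hkn]

-- ===== VERDICT (by name: the statement is the Claim_ definition above) =====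
theorem split_caption_and_rest_py_spec : Claim_equal_split_caption_and_rest_py := by
  intro lines limit _
  unfold Spec_split_caption_and_rest_py
  rw [pvA_eq_canon, pvB_eq_canon]
  congr 1
  exact pvP_unique lines limit _ _ (pvKG_P lines limit)
    (pvBS_spec lines limit lines.length 0 lines.length (by omega) (by omega) (le_refl _)
      (Or.inr rfl) (Or.inl rfl))
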